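-- pv_equiv track=rewrite | github.com/8sandro8/Organizador-de-Tareaas | dash_autosync.py | ensure_log_section
-- ===== SOURCE A (Python) =====
-- def ensure_log_section(lines):
--     L = lines[:]
--     hdr = None
--     for i, ln in enumerate(L):
--         if ln.strip().lower().startswith("## hechas (log)"):
--             hdr = i; break
--     if hdr is None:
--         if L and L[-1].strip() != "": L.append("")
--         L += ["## Hechas (log)", ""]
--         hdr = len(L) - 2
--     j = hdr + 1
--     while j < len(L) and not L[j].startswith("## "):
--         j += 1
--     return L, hdr, j
-- ===== SOURCE B (Python) =====
-- def ensure_log_section(lines):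
--     L = list(lines)
--     hdr = next((i for i, ln in enumerate(L)
--                 if ln.strip().lower().startswith("## hechas (log)")), None)
--     if hdr is None:
--         if L and L[-1].strip() != "":
--             L.append("")
--         L += ["## Hechas (log)", ""]
--         hdr = len(L) - 2
--     bounds = [i for i, ln in enumerate(L) if ln.startswith("## ")]
--     j = next((b for b in bounds if b > hdr), len(L))
--     return L, hdr, j
-- ===== Notes on version B (the rewrite author's own statement) =====
-- stated objective: alternative
-- what changed: B replaces A's incremental while-loop scan for the end of the log section with a single comprehension building the list of all '## ' boundary indices and a first-match lookup of the first boundary past the header (and finds the header with next() over enumerate instead of a break loop).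
import Mathlib
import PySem

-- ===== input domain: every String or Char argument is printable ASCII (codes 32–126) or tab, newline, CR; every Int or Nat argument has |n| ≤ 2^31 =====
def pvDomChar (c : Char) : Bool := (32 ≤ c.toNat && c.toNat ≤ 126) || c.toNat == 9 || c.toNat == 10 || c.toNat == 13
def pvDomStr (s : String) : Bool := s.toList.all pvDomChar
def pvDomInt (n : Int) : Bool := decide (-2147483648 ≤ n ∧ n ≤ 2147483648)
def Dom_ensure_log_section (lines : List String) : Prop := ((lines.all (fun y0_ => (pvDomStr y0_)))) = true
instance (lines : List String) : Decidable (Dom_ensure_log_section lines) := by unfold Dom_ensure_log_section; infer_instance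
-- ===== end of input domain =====

-- B replaces A's incremental while-scan for the section end with a one-pass boundary-index
-- table plus a first-match lookup (objective: alternative decomposition; same cost).

-- the two tests both Pythons use
def pvCondHdr (s : String) : Bool :=
  PySem.Str.startswith (PySem.Str.lower (PySem.Str.strip s)) "## hechas (log)"

def pvCondBound (s : String) : Bool := PySem.Str.startswith s "## "

-- the insertion block, textually identical in A and in B:
-- if L and L[-1].strip() != "": L.append("")
-- L += ["## Hechas (log)", ""]
def pvEnsureTail (L : List String) : List String :=
  match L.getLast? with
  | some last => if PySem.Str.strip last = "" then L else L ++ [""]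
  | none => L

-- ===== PORT A =====
-- for i, ln in enumerate(L): if ln.strip().lower().startswith(...): hdr = i; break
def pvA_findHdr : List (Int × String) → Option Int
  | [] => none
  | (i, ln) :: rest => if pvCondHdr ln then some i else pvA_findHdr rest

-- while j < len(L) and not L[j].startswith("## "): j += 1
-- (L[j] is in range whenever it is read: the guard gives j < len and every call site passes
--  a nonnegative j, so pyGetD's default is never used)
def pvA_while (L : List String) (j : Int) : Int :=
  if h : j < (L.length : Int) then
    if pvCondBound (PySem.List.pyGetD L j "") then j else pvA_while L (j + 1)
  else j
termination_by ((L.length : Int) - j).toNat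
decreasing_by omega

def ensure_log_section (lines : List String) : List String × Int × Int :=
  match pvA_findHdr (PySem.List.enumerate lines 0) with
  | some hdr => (lines, hdr, pvA_while lines (hdr + 1))
  | none =>
    let L := pvEnsureTail lines ++ ["## Hechas (log)", ""]
    let hdr : Int := (L.length : Int) - 2
    (L, hdr, pvA_while L (hdr + 1))

-- ===== PORT B =====
-- bounds = [i for i, ln in enumerate(L) if ln.startswith("## ")]
def pvBounds (L : List String) : List Int :=
  (PySem.List.enumerate L 0).filterMap (fun p => if pvCondBound p.2 then some p.1 else none)

def ensure_log_section_alt (lines : List String) : List String × Int × Int :=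
  -- hdr = next((i for i, ln in enumerate(L) if …), None)
  match ((PySem.List.enumerate lines 0).find? (fun p => pvCondHdr p.2)).map (·.1) with
  | some hdr =>
    (lines, hdr, ((pvBounds lines).find? (fun b => decide (hdr < b))).getD (lines.length : Int))
  | none =>
    let L := pvEnsureTail lines ++ ["## Hechas (log)", ""]
    let hdr : Int := (L.length : Int) - 2
    (L, hdr, ((pvBounds L).find? (fun b => decide (hdr < b))).getD (L.length : Int))

-- ===== PRECONDITION & SPEC =====
def Spec_ensure_log_section (lines : List String) (out : List String × Int × Int) : Prop := out = ensure_log_section_alt lines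
instance (lines : List String) (out : List String × Int × Int) : Decidable (Spec_ensure_log_section lines out) := by unfold Spec_ensure_log_section; infer_instance

-- ===== CLAIM (what is proved, stated in full; the proofs are below) =====
def Claim_equal_ensure_log_section : Prop := ∀ (lines : List String), Dom_ensure_log_section lines → Spec_ensure_log_section lines (ensure_log_section lines)

-- ===== LEMMAS AND PROOFS =====

theorem pv_findHdr_eq (xs : List (Int × String)) :
    pvA_findHdr xs = (xs.find? (fun p => pvCondHdr p.2)).map (·.1) := by
  induction xs with
  | nil => rfl
  | cons p rest ih =>
    obtain ⟨i, ln⟩ := p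
    by_cases h : pvCondHdr ln <;> simp [pvA_findHdr, h, ih]

-- A's while loop computed as the first boundary of the suffix starting at j
theorem pv_whileA_eq (n : Nat) : ∀ (L : List String) (j : Nat), L.length - j = n → j ≤ L.length →
    pvA_while L (j : Int) =
      (((PySem.List.enumerate (L.drop j) (j : Int)).filterMap
        (fun p => if pvCondBound p.2 then some p.1 else none)).head?).getD (L.length : Int) := by
  induction n with
  | zero =>
    intro L j hn hle
    have hj : j = L.length := by omega
    rw [pvA_while]
    simp [hj]
  | succ n ih =>
    intro L j hn hle
    have hlt : j < L.length := by omega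
    rw [pvA_while]
    rw [List.drop_eq_getElem_cons hlt, PySem.List.enumerate_cons]
    have hget : PySem.List.pyGetD L (j : Int) "" = L[j] := by
      rw [PySem.List.pyGetD_natCast]
      exact List.getD_eq_getElem _ _ hlt
    by_cases hb : pvCondBound L[j]
    · simp [hlt, hget, hb]
    · have : ((j : Int) + 1) = ((j + 1 : Nat) : Int) := by push_cast; ring
      simp only [hget, hb, dif_pos (by exact_mod_cast hlt : (j:Int) < (L.length:Int)), this]
      rw [ih L (j + 1) (by omega) (by omega)]
      simp [hb]

-- first element of a list on which the predicate holds everywhere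
theorem pv_find?_all {α : Type} (l : List α) (p : α → Bool) (h : ∀ x ∈ l, p x = true) :
    l.find? p = l.head? := by
  cases l with
  | nil => rfl
  | cons a l => simp [h a (List.mem_cons_self)]

-- B's table lookup computed as the same suffix head
theorem pv_findB_eq (L : List String) (hdr : Int) (j : Nat) (hj : (hdr + 1) = (j : Int))
    (hle : j ≤ L.length) :
    ((pvBounds L).find? (fun b => decide (hdr < b))).getD (L.length : Int) =
      (((PySem.List.enumerate (L.drop j) (j : Int)).filterMap
        (fun p => if pvCondBound p.2 then some p.1 else none)).head?).getD (L.length : Int) := by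
  unfold pvBounds
  conv_lhs => rw [show L = L.take j ++ L.drop j from (List.take_append_drop j L).symm]
  rw [PySem.List.enumerate_append, List.filterMap_append, List.find?_append]
  have hlen : (L.take j).length = j := by simp [hle]
  have h1 : ((PySem.List.enumerate (L.take j) 0).filterMap
      (fun p => if pvCondBound p.2 then some p.1 else none)).find? (fun b => decide (hdr < b)) = none := by
    rw [List.find?_eq_none]
    intro b hb
    rw [List.mem_filterMap] at hb
    obtain ⟨p, hp, hfp⟩ := hb
    rw [PySem.List.mem_enumerate_iff] at hp
    obtain ⟨k, hk, rfl⟩ := hp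
    split at hfp
    · injection hfp with hfp
      simp only [decide_eq_true_eq]
      omega
    · exact absurd hfp (by simp)
  have h2 : ((PySem.List.enumerate (L.drop j) (0 + (L.take j).length)).filterMap
      (fun p => if pvCondBound p.2 then some p.1 else none)).find? (fun b => decide (hdr < b)) =
      ((PySem.List.enumerate (L.drop j) (0 + (L.take j).length)).filterMap
      (fun p => if pvCondBound p.2 then some p.1 else none)).head? := by
    apply pv_find?_all
    intro b hb
    rw [List.mem_filterMap] at hb
    obtain ⟨p, hp, hfp⟩ := hb
    rw [PySem.List.mem_enumerate_iff] at hp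
    obtain ⟨k, hk, rfl⟩ := hp
    split at hfp
    · injection hfp with hfp
      simp only [decide_eq_true_eq]
      rw [hlen] at hfp
      omega
    · exact absurd hfp (by simp)
  rw [h1, h2, Option.none_or]
  have h3 : (0 + ((L.take j).length : Int)) = (j : Int) := by rw [hlen]; ring
  rw [h3, List.take_append_drop]

-- combining the two: A's scan equals B's lookup whenever the start index is in range
theorem pv_scan_eq (L : List String) (hdr : Int) (j : Nat) (hj : (hdr + 1) = (j : Int))
    (hle : j ≤ L.length) :
    pvA_while L (hdr + 1) =
      ((pvBounds L).find? (fun b => decide (hdr < b))).getD (L.length : Int) := by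
  rw [hj, pv_whileA_eq (L.length - j) L j rfl hle, pv_findB_eq L hdr j hj hle]

-- ===== VERDICT (by name: the statement is the Claim_ definition above) =====
theorem ensure_log_section_spec : Claim_equal_ensure_log_section := by
  intro lines _
  unfold Spec_ensure_log_section ensure_log_section ensure_log_section_alt
  rw [pv_findHdr_eq]
  cases hf : (PySem.List.enumerate lines 0).find? (fun p => pvCondHdr p.2) with
  | none => -- insertion case: both build the same L, hdr = len L - 2, len L ≥ 2
    simp only [Option.map_none]
    have hlen2 : 2 ≤ (pvEnsureTail lines ++ ["## Hechas (log)", ""]).length := by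
      simp
    refine Prod.ext rfl (Prod.ext rfl ?_)
    simp only
    set L := pvEnsureTail lines ++ ["## Hechas (log)", ""] with hL
    exact pv_scan_eq L ((L.length : Int) - 2) (L.length - 1)
      (by omega) (by omega)
  | some p =>
    obtain ⟨hdr, ln⟩ := p
    have hmem := List.mem_of_find?_eq_some hf
    rw [PySem.List.mem_enumerate_iff] at hmem
    obtain ⟨k, hk, hpk⟩ := hmem
    have hhdr : hdr = (k : Int) := by
      have := congrArg Prod.fst hpk
      simpa using this
    simp only [Option.map_some]
    refine Prod.ext rfl (Prod.ext rfl ?_)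
    simp only
    exact pv_scan_eq lines hdr (k + 1) (by push_cast; omega) (by omega)
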